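-- pv_equiv track=rewrite | github.com/jonathanharr/AdventOfCode2023 | day7/part2.py | count_char_duplicates_with_joker
-- ===== SOURCE A (Python) =====
-- def count_char_duplicates(chars):
--     counter_list = []
--     cards_checked_already = []
--     for i in range(len(chars)):
--         if chars[i] in cards_checked_already:
--             continue
--         cards_checked_already.append(chars[i])
--
--         counter = chars.count(chars[i])
--         if counter > 1:
--             counter_list.append(counter)
--
--     return counter_list
--
-- def compare_types(cards_type, other_cards_type):
--     if cards_type == other_cards_type:
--         return cards_type
--     if cards_type < other_cards_type:
--         return cards_type
--
--     return other_cards_type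
--
-- def count_char_duplicates_with_joker(chars):
--     cards_exc_joker = []
--     cards_checked_already = []
--     amount_of_jokers = chars.count('J')
--
--     if amount_of_jokers == 5:
--         return 0
--
--     for i in range(len(chars)):
--         if chars[i] in cards_checked_already:
--             continue
--
--         if chars[i] == 'J':
--             continue
--
--         cards_checked_already.append(chars[i])
--         cards_exc_joker.append(chars[i])
--
--     cards_checked_already = []
--
--     best_hand_so_far = 6
--     for i in range(len(cards_exc_joker)):
--         if cards_exc_joker[i] in cards_checked_already:
--             continue
--         card = cards_exc_joker[i]
--
--         modified_by_joker = ['J' if char == card else char for char in chars]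
--         points = count_char_duplicates(modified_by_joker)
--         hand_type = get_hand_type(points)
--         best_hand_so_far = compare_types(best_hand_so_far, hand_type)
--
--     return best_hand_so_far
--
-- def get_hand_type(label_counts):
--     if 5 in label_counts:
--         return 0
--     elif 4 in label_counts:
--         return 1
--     elif 3 in label_counts and 2 in label_counts:
--         return 2
--     elif 3 in label_counts:
--         return 3
--     elif label_counts.count(2) == 2:
--         return 4
--     elif 2 in label_counts:
--         return 5
--     else:
--         return 6
-- ===== SOURCE B (Python) =====
-- def get_hand_type(label_counts):
--     if 5 in label_counts:
--         return 0
--     elif 4 in label_counts: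
--         return 1
--     elif 3 in label_counts and 2 in label_counts:
--         return 2
--     elif 3 in label_counts:
--         return 3
--     elif label_counts.count(2) == 2:
--         return 4
--     elif 2 in label_counts:
--         return 5
--     else:
--         return 6
--
--
-- def count_char_duplicates_with_joker(chars):
--     jokers = chars.count('J')
--     if jokers == 5:
--         return 0
--     counts = {}
--     for ch in chars:
--         if ch != 'J':
--             counts[ch] = counts.get(ch, 0) + 1
--     best = 6
--     for card in counts:
--         merged = counts[card] + jokers
--         label_counts = [v for k, v in counts.items() if k != card and v > 1]
--         if merged > 1:
--             label_counts.append(merged)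
--         best = min(best, get_hand_type(label_counts))
--     return best
-- ===== Notes on version B (the rewrite author's own statement) =====
-- stated objective: faster
-- what changed: A rebuilds a joker-substituted copy of the hand and re-counts every card of it (count() per distinct card) for each candidate merge; B counts all cards once into a dict and reads each candidate's label counts and merged group straight from the dict.
import Mathlib
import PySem

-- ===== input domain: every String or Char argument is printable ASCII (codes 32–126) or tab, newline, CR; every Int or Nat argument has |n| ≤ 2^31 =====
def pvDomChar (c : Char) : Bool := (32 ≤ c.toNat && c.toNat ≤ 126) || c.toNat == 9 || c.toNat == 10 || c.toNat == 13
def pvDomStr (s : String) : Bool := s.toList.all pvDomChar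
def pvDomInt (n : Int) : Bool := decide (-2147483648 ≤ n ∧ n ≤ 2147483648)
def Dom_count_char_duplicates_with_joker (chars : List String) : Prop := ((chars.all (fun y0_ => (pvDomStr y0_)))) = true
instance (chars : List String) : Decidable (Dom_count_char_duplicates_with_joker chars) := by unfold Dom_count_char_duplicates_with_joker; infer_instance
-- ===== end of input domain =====

-- B builds one dict of non-joker counts in a single pass and derives each candidate's label counts
-- from it, instead of A's per-candidate rebuild-and-recount of the whole hand (objective: faster).


-- ===== PORT A =====
-- helper count_char_duplicates from the same module (literal: index loop, membership check,
-- full-list .count per new value).  chars[i] is always in range here, so pyGetD is exact.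
def count_char_duplicates (chars : List String) : List Int :=
  ((PySem.List.pyRange 0 (PySem.List.len chars)).foldl
    (fun (st : List Int × List String) i =>
      let x := PySem.List.pyGetD chars i ""
      if x ∈ st.2 then st
      else
        let checked := st.2 ++ [x]
        let counter : Int := (PySem.List.count chars x : Int)
        ((if counter > 1 then st.1 ++ [counter] else st.1), checked))
    ([], [])).1

def compare_types (cards_type other_cards_type : Int) : Int :=
  if cards_type = other_cards_type then cards_type
  else if cards_type < other_cards_type then cards_type
  else other_cards_type

def get_hand_type (label_counts : List Int) : Int :=
  if (5 : Int) ∈ label_counts then 0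
  else if (4 : Int) ∈ label_counts then 1
  else if (3 : Int) ∈ label_counts ∧ (2 : Int) ∈ label_counts then 2
  else if (3 : Int) ∈ label_counts then 3
  else if PySem.List.count label_counts 2 = 2 then 4
  else if (2 : Int) ∈ label_counts then 5
  else 6

def count_char_duplicates_with_joker (chars : List String) : Int :=
  let amount_of_jokers : Int := (PySem.List.count chars "J" : Int)
  if amount_of_jokers = 5 then 0
  else
    -- first loop: collect distinct non-'J' cards (cards_exc_joker and cards_checked_already grow identically)
    let st1 := (PySem.List.pyRange 0 (PySem.List.len chars)).foldl
      (fun (st : List String × List String) i =>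
        let x := PySem.List.pyGetD chars i ""
        if x ∈ st.2 then st
        else if x = "J" then st
        else (st.1 ++ [x], st.2 ++ [x]))
      ([], [])
    let cards_exc_joker := st1.1
    -- second loop: cards_checked_already was reset to [] and is never appended to again
    let st2 := (PySem.List.pyRange 0 (PySem.List.len cards_exc_joker)).foldl
      (fun (st : Int × List String) i =>
        let card := PySem.List.pyGetD cards_exc_joker i ""
        if card ∈ st.2 then st
        else
          let modified_by_joker := chars.map (fun char => if char = card then "J" else char)
          let points := count_char_duplicates modified_by_joker
          let hand_type := get_hand_type points
          (compare_types st.1 hand_type, st.2))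
      (6, [])
    st2.1

-- ===== PORT B =====
-- Source B re-uses the module's get_hand_type verbatim, ported once above.
-- counts[card] in Source B is a lookup of a key that is present (card ranges over counts' keys),
-- so Dict.getD is exact there.
def count_char_duplicates_with_joker_alt (chars : List String) : Int :=
  let jokers : Int := (PySem.List.count chars "J" : Int)
  if jokers = 5 then 0
  else
    let counts := chars.foldl
      (fun (d : PySem.Dict String Int) ch =>
        if ch ≠ "J" then d.insert ch (d.getD ch 0 + 1) else d)
      PySem.Dict.empty
    counts.keys.foldl
      (fun (best : Int) card =>
        let merged := counts.getD card 0 + jokers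
        let label_counts := (counts.items.filter (fun kv => kv.1 ≠ card ∧ kv.2 > 1)).map (fun kv => kv.2)
        let label_counts := if merged > 1 then label_counts ++ [merged] else label_counts
        min best (get_hand_type label_counts))
      6

-- ===== PRECONDITION & SPEC =====
def Spec_count_char_duplicates_with_joker (chars : List String) (out : Int) : Prop := out = count_char_duplicates_with_joker_alt chars
instance (chars : List String) (out : Int) : Decidable (Spec_count_char_duplicates_with_joker chars out) := by unfold Spec_count_char_duplicates_with_joker; infer_instance

-- ===== CLAIM (what is proved, stated in full; the proofs are below) =====
def Claim_equal_count_char_duplicates_with_joker : Prop := ∀ (chars : List String), Dom_count_char_duplicates_with_joker chars → Spec_count_char_duplicates_with_joker chars (count_char_duplicates_with_joker chars)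

-- ===== LEMMAS AND PROOFS =====

-- first-occurrence dedup relative to an already-seen list
def dd0 (s : List String) : List String → List String
  | [] => []
  | x :: xs => if x ∈ s then dd0 s xs else x :: dd0 (s ++ [x]) xs

theorem dd0_mem (xs : List String) : ∀ (s : List String) (v : String),
    v ∈ dd0 s xs ↔ v ∈ xs ∧ v ∉ s := by
  induction xs with
  | nil => simp [dd0]
  | cons x xs ih =>
    intro s v
    by_cases hx : x ∈ s
    · simp only [dd0, if_pos hx, ih, List.mem_cons]
      constructor
      · rintro ⟨h1, h2⟩; exact ⟨Or.inr h1, h2⟩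
      · rintro ⟨rfl | h1, h2⟩
        · exact absurd hx h2
        · exact ⟨h1, h2⟩
    · simp only [dd0, if_neg hx, List.mem_cons, ih, List.mem_append]
      by_cases hvx : v = x
      · subst hvx; simp [hx]
      · simp [hvx]

theorem dd0_nodup (xs : List String) : ∀ (s : List String), s.Nodup → (s ++ dd0 s xs).Nodup := by
  induction xs with
  | nil => intro s hs; simpa [dd0]
  | cons x xs ih =>
    intro s hs
    by_cases hx : x ∈ s
    · simpa [dd0, if_pos hx] using ih s hs
    · have := ih (s ++ [x])
        (by rw [List.nodup_append]
            exact ⟨hs, List.nodup_singleton x, by intro a ha b hb; rw [List.mem_singleton] at hb; subst hb; intro h; subst h; exact hx ha⟩)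
      simpa [dd0, if_neg hx, List.append_assoc] using this

-- loop of count_char_duplicates, characterised
theorem ccd_loop (ys : List String) : ∀ (xs : List String) (cl : List Int) (s : List String),
    xs.foldl (fun (st : List Int × List String) x =>
      if x ∈ st.2 then st
      else
        ((if 1 < List.count x ys then st.1 ++ [(List.count x ys : Int)] else st.1),
          st.2 ++ [x])) (cl, s)
    = (cl ++ ((dd0 s xs).filter (fun v => 1 < List.count v ys)).map
          (fun v => (List.count v ys : Int)),
       s ++ dd0 s xs) := by
  intro xs
  induction xs with
  | nil => intro cl s; simp [dd0]
  | cons x xs ih =>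
    intro cl s
    by_cases hx : x ∈ s
    · simp [hx, dd0, ih]
    · by_cases hc : 1 < List.count x ys
      · simp [hx, hc, dd0, ih]
      · simp [hx, hc, dd0, ih]

theorem ccd_eq (ys : List String) :
    count_char_duplicates ys
      = ((dd0 [] ys).filter (fun v => 1 < List.count v ys)).map
          (fun v => (List.count v ys : Int)) := by
  have h2 : count_char_duplicates ys
      = (List.foldl (fun (st : List Int × List String) x =>
          if x ∈ st.2 then st
          else
            ((if (PySem.List.count ys x : Int) > 1 then st.1 ++ [(PySem.List.count ys x : Int)] else st.1),
              st.2 ++ [x])) ([], []) ys).1 :=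
    congrArg Prod.fst (PySem.List.foldl_pyRange_zero_pyGetD' ys ""
      (fun (st : List Int × List String) x =>
        if x ∈ st.2 then st
        else
          ((if (PySem.List.count ys x : Int) > 1 then st.1 ++ [(PySem.List.count ys x : Int)] else st.1),
            st.2 ++ [x])) ([], []))
  rw [h2]
  simp only [PySem.List.count_eq, gt_iff_lt, Nat.one_lt_cast]
  rw [ccd_loop]
  simp

theorem compare_types_eq_min (a b : Int) : compare_types a b = min a b := by
  unfold compare_types
  split_ifs <;> omega

theorem get_hand_type_perm {l l' : List Int} (h : l.Perm l') :
    get_hand_type l = get_hand_type l' := by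
  unfold get_hand_type
  rw [PySem.List.count_eq, PySem.List.count_eq, h.count_eq]
  simp only [h.mem_iff]

-- the non-'J' cards, and abbreviations for B's per-candidate data
def fltJ (chars : List String) : List String := chars.filter (fun x => x ≠ "J")

def mergedI (chars : List String) (c : String) : Int :=
  (List.count c (fltJ chars) : Int) + (List.count "J" chars : Int)

def LB0 (chars : List String) (c : String) : List Int :=
  ((PySem.Set.ofList (fltJ chars)).filter
      (fun k => ¬k = c ∧ (List.count k (fltJ chars) : Int) > 1)).map
    (fun k => (List.count k (fltJ chars) : Int))

theorem loop1_pair : ∀ (xs : List String) (p : List String),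
    xs.foldl (fun (st : List String × List String) x =>
      if x ∈ st.2 then st else if x = "J" then st else (st.1 ++ [x], st.2 ++ [x])) (p, p)
    = ((xs.filter (fun x => x ≠ "J")).foldl PySem.Set.add p,
       (xs.filter (fun x => x ≠ "J")).foldl PySem.Set.add p) := by
  intro xs
  induction xs with
  | nil => intro p; simp
  | cons x xs ih =>
    intro p
    by_cases hJ : x = "J"
    · subst hJ
      by_cases hx : "J" ∈ p <;> simp [hx, ih]
    · by_cases hx : x ∈ p
      · have ha : PySem.Set.add p x = p := by
          simp [PySem.Set.add, hx]
        simp [hx, hJ, ih]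
      · have ha : PySem.Set.add p x = p ++ [x] := by
          simp [PySem.Set.add, hx]
        simp [hx, hJ, ih]

theorem loop2 (q : String → Int) : ∀ (xs : List String) (b : Int),
    xs.foldl (fun (st : Int × List String) c =>
      if c ∈ st.2 then st else (compare_types st.1 (q c), st.2)) (b, [])
    = (xs.foldl (fun b c => compare_types b (q c)) b, []) := by
  intro xs
  induction xs with
  | nil => intro b; simp
  | cons x xs ih =>
    intro b
    rw [List.foldl_cons, List.foldl_cons, if_neg (List.not_mem_nil)]
    exact ih _

theorem ofList_eq_foldl (l : List String) :
    PySem.Set.ofList l = l.foldl PySem.Set.add ([] : List String) := rfl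

theorem bdict (chars : List String) :
    chars.foldl (fun (d : PySem.Dict String Int) ch =>
        if ch ≠ "J" then d.insert ch (d.getD ch 0 + 1) else d) PySem.Dict.empty
      = PySem.Dict.counter (fltJ chars) := by
  rw [PySem.Dict.counter_eq_foldl, fltJ, List.foldl_filter]
  apply PySem.List.foldl_congr_mem
  intro acc x _
  by_cases hJ : x = "J" <;> simp [hJ, PySem.Dict.modify]

theorem count_map_joker (c : String) (hc : c ≠ "J") : ∀ (chars : List String),
    List.count "J" (chars.map (fun ch => if ch = c then "J" else ch))
      = List.count "J" chars + List.count c chars := by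
  intro chars
  induction chars with
  | nil => simp
  | cons a t ih =>
    by_cases h : a = c
    · simp [h, ih, hc]
      omega
    · by_cases hJ : a = "J"
      · have hJc : ¬(("J" : String) = c) := fun hh => h (hJ.trans hh)
        simp [hJ, hJc, ih]
        omega
      · simp [h, hJ, ih]

theorem count_map_other (c v : String) (hv : v ≠ c) (hvJ : v ≠ "J") : ∀ (chars : List String),
    List.count v (chars.map (fun ch => if ch = c then "J" else ch)) = List.count v chars := by
  intro chars
  induction chars with
  | nil => simp
  | cons a t ih =>
    by_cases h : a = c
    · subst h; simp [ih, Ne.symm hvJ, Ne.symm hv]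
    · simp [List.count_cons, h, ih]

theorem mem_map_joker (chars : List String) (c v : String) (hvJ : v ≠ "J") :
    v ∈ chars.map (fun ch => if ch = c then "J" else ch) ↔ v ∈ chars ∧ v ≠ c := by
  constructor
  · intro h
    rcases List.mem_map.mp h with ⟨a, ha, hfa⟩
    by_cases hac : a = c
    · rw [if_pos hac] at hfa; exact absurd hfa.symm hvJ
    · rw [if_neg hac] at hfa; subst hfa; exact ⟨ha, hac⟩
  · rintro ⟨ha, hvc⟩
    exact List.mem_map.mpr ⟨v, ha, by rw [if_neg hvc]⟩

theorem count_fltJ (chars : List String) (k : String) (hk : k ≠ "J") :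
    List.count k (fltJ chars) = List.count k chars :=
  List.count_filter (by simp [hk])

theorem mem_fltJ (chars : List String) (k : String) :
    k ∈ fltJ chars ↔ k ∈ chars ∧ k ≠ "J" := by
  simp [fltJ]

theorem A_eq (chars : List String) (h5 : ¬((List.count "J" chars : Int) = 5)) :
    count_char_duplicates_with_joker chars
      = (PySem.Set.ofList (fltJ chars)).foldl
          (fun b c => min b (get_hand_type (count_char_duplicates
            (chars.map (fun char => if char = c then "J" else char))))) 6 := by
  have hne : ¬((PySem.List.count chars "J" : Int) = 5) := by
    simpa [PySem.List.count_eq] using h5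
  have hst1 : (PySem.List.pyRange 0 (PySem.List.len chars)).foldl
      (fun (st : List String × List String) i =>
        if PySem.List.pyGetD chars i "" ∈ st.2 then st
        else if PySem.List.pyGetD chars i "" = "J" then st
        else (st.1 ++ [PySem.List.pyGetD chars i ""], st.2 ++ [PySem.List.pyGetD chars i ""]))
      ([], [])
      = ((chars.filter (fun x => x ≠ "J")).foldl PySem.Set.add [],
         (chars.filter (fun x => x ≠ "J")).foldl PySem.Set.add []) :=
    (PySem.List.foldl_pyRange_zero_pyGetD' chars ""
      (fun (st : List String × List String) x =>
        if x ∈ st.2 then st else if x = "J" then st else (st.1 ++ [x], st.2 ++ [x]))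
      ([], [])).trans (loop1_pair chars [])
  unfold count_char_duplicates_with_joker
  simp only [hst1]
  rw [if_neg hne]
  have hst2 : (PySem.List.pyRange 0
        (PySem.List.len ((chars.filter (fun x => x ≠ "J")).foldl PySem.Set.add []))).foldl
      (fun (st : Int × List String) i =>
        if PySem.List.pyGetD ((chars.filter (fun x => x ≠ "J")).foldl PySem.Set.add []) i "" ∈ st.2 then st
        else
          (compare_types st.1 (get_hand_type (count_char_duplicates
            (chars.map (fun char =>
              if char = PySem.List.pyGetD ((chars.filter (fun x => x ≠ "J")).foldl PySem.Set.add []) i ""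
              then "J" else char)))), st.2))
      (6, [])
      = (((chars.filter (fun x => x ≠ "J")).foldl PySem.Set.add []).foldl
          (fun b c => compare_types b (get_hand_type (count_char_duplicates
            (chars.map (fun char => if char = c then "J" else char))))) 6, []) :=
    (PySem.List.foldl_pyRange_zero_pyGetD'
      ((chars.filter (fun x => x ≠ "J")).foldl PySem.Set.add []) ""
      (fun (st : Int × List String) card =>
        if card ∈ st.2 then st
        else
          (compare_types st.1 (get_hand_type (count_char_duplicates
            (chars.map (fun char => if char = card then "J" else char)))), st.2))
      (6, [])).trans
      (loop2 (fun card => get_hand_type (count_char_duplicates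
        (chars.map (fun char => if char = card then "J" else char))))
        ((chars.filter (fun x => x ≠ "J")).foldl PySem.Set.add []) 6)
  simp only [hst2]
  rw [ofList_eq_foldl, fltJ]
  exact PySem.List.foldl_congr_mem _ _ _ _
    (fun acc x _ => compare_types_eq_min acc _)

theorem B_eq (chars : List String) (h5 : ¬((List.count "J" chars : Int) = 5)) :
    count_char_duplicates_with_joker_alt chars
      = (PySem.Set.ofList (fltJ chars)).foldl
          (fun b c => min b (get_hand_type
            (if mergedI chars c > 1 then LB0 chars c ++ [mergedI chars c] else LB0 chars c))) 6 := by
  have hne : ¬((PySem.List.count chars "J" : Int) = 5) := by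
    simpa [PySem.List.count_eq] using h5
  unfold count_char_duplicates_with_joker_alt
  simp only [bdict chars]
  rw [if_neg hne]
  rw [PySem.Dict.keys_counter]
  apply PySem.List.foldl_congr_mem
  intro acc card _
  simp only [PySem.Dict.getD_counter, PySem.Dict.items_counter, PySem.List.count_eq,
    List.filter_map, List.map_map]
  simp [mergedI, LB0, fltJ, Function.comp_def]

theorem core (chars : List String) (c : String) (hcC : c ∈ chars) (hcJ : c ≠ "J") :
    get_hand_type (count_char_duplicates (chars.map (fun char => if char = c then "J" else char)))
      = get_hand_type (if mergedI chars c > 1 then LB0 chars c ++ [mergedI chars c] else LB0 chars c) := by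
  have hJm : List.count "J" (chars.map (fun char => if char = c then "J" else char))
      = List.count "J" chars + List.count c chars := count_map_joker c hcJ chars
  have hmi : mergedI chars c
      = ((List.count "J" (chars.map (fun char => if char = c then "J" else char)) : Nat) : Int) := by
    rw [hJm]; unfold mergedI; rw [count_fltJ chars c hcJ]; push_cast; ring
  have ndF : ((PySem.Set.ofList (fltJ chars)).filter
      (fun k => ¬k = c ∧ (List.count k (fltJ chars) : Int) > 1)).Nodup :=
    List.Nodup.filter _ (PySem.Set.nodup_ofList _)
  have nd1 : ((dd0 [] (chars.map (fun char => if char = c then "J" else char))).filter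
      (fun v => 1 < List.count v (chars.map (fun char => if char = c then "J" else char)))).Nodup :=
    List.Nodup.filter _ (by simpa using dd0_nodup (chars.map (fun char => if char = c then "J" else char)) [] List.nodup_nil)
  have nd2 : (((PySem.Set.ofList (fltJ chars)).filter
        (fun k => ¬k = c ∧ (List.count k (fltJ chars) : Int) > 1))
      ++ (if 1 < List.count "J" (chars.map (fun char => if char = c then "J" else char)) then ["J"] else [])).Nodup := by
    by_cases hco : 1 < List.count "J" (chars.map (fun char => if char = c then "J" else char))
    · rw [if_pos hco]
      refine List.Nodup.append ndF (List.nodup_singleton _) ?_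
      intro a ha hb
      rw [List.mem_singleton] at hb; subst hb
      exact ((mem_fltJ chars _).mp ((PySem.Set.mem_ofList _ _).mp (List.mem_filter.mp ha).1)).2 rfl
    · rw [if_neg hco]; simpa using ndF
  have hJmem : ("J" : String) ∈ chars.map (fun char => if char = c then "J" else char) :=
    List.mem_map.mpr ⟨c, hcC, by rw [if_pos rfl]⟩
  have memiff : ∀ v, (v ∈ (dd0 [] (chars.map (fun char => if char = c then "J" else char))).filter
        (fun v => 1 < List.count v (chars.map (fun char => if char = c then "J" else char))))
      ↔ v ∈ (((PySem.Set.ofList (fltJ chars)).filter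
            (fun k => ¬k = c ∧ (List.count k (fltJ chars) : Int) > 1))
          ++ (if 1 < List.count "J" (chars.map (fun char => if char = c then "J" else char)) then ["J"] else [])) := by
    intro v
    rw [List.mem_filter, dd0_mem, List.mem_append, List.mem_filter]
    by_cases hvJ : v = "J"
    · subst hvJ
      by_cases hco : 1 < List.count "J" (chars.map (fun char => if char = c then "J" else char)) <;>
        simp [hco, hJmem, PySem.Set.mem_ofList, mem_fltJ]
    · by_cases hvc : v = c
      · have hne2 : ∀ a ∈ chars, ¬((if a = c then "J" else a) = c) := by
          intro a _ h
          by_cases hac : a = c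
          · rw [if_pos hac] at h; exact hcJ h.symm
          · rw [if_neg hac] at h; exact hac h
        by_cases hco : 1 < List.count "J" (chars.map (fun char => if char = c then "J" else char)) <;>
          (simp [hco, hvc, hcJ]
           intro x hx hfx
           exact absurd hfx (hne2 x hx))
      · rw [mem_map_joker chars c v hvJ, count_map_other c v hvc hvJ chars]
        by_cases hco : 1 < List.count "J" (chars.map (fun char => if char = c then "J" else char)) <;>
          simp [hco, hvJ, hvc, PySem.Set.mem_ofList, mem_fltJ, count_fltJ chars v hvJ]
  have hperm := (List.perm_ext_iff_of_nodup nd1 nd2).mpr memiff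
  rw [ccd_eq]
  rw [get_hand_type_perm (hperm.map (fun v => (List.count v (chars.map (fun char => if char = c then "J" else char)) : Int)))]
  rw [List.map_append]
  have e1 : ((PySem.Set.ofList (fltJ chars)).filter
        (fun k => ¬k = c ∧ (List.count k (fltJ chars) : Int) > 1)).map
      (fun v => (List.count v (chars.map (fun char => if char = c then "J" else char)) : Int))
      = LB0 chars c := by
    unfold LB0
    apply List.map_congr_left
    intro k hk
    have hk1 := List.mem_filter.mp hk
    have hkm := (mem_fltJ chars k).mp ((PySem.Set.mem_ofList _ _).mp hk1.1)
    have hkc : ¬k = c := by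
      have := hk1.2; simp only [decide_eq_true_eq] at this; exact this.1
    rw [count_map_other c k hkc hkm.2 chars, count_fltJ chars k hkm.2]
  have e2 : (if 1 < List.count "J" (chars.map (fun char => if char = c then "J" else char)) then ["J"] else []).map
      (fun v => (List.count v (chars.map (fun char => if char = c then "J" else char)) : Int))
      = (if mergedI chars c > 1 then [mergedI chars c] else []) := by
    have hcond : (mergedI chars c > 1)
        = (1 < List.count "J" (chars.map (fun char => if char = c then "J" else char))) := by
      rw [hmi]; simp
    by_cases hco : 1 < List.count "J" (chars.map (fun char => if char = c then "J" else char))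
    · rw [if_pos hco, if_pos (by rw [hcond]; exact hco)]
      simp [hmi]
    · rw [if_neg hco, if_neg (by rw [hcond]; exact hco)]
      simp
  rw [e1, e2]
  by_cases hco : mergedI chars c > 1
  · rw [if_pos hco, if_pos hco]
  · rw [if_neg hco, if_neg hco]
    simp

-- ===== VERDICT (by name: the statement is the Claim_ definition above) =====
theorem count_char_duplicates_with_joker_spec : Claim_equal_count_char_duplicates_with_joker := by
  intro chars _
  unfold Spec_count_char_duplicates_with_joker
  by_cases h5 : (PySem.List.count chars "J" : Int) = 5
  · unfold count_char_duplicates_with_joker count_char_duplicates_with_joker_alt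
    rw [if_pos h5, if_pos h5]
  · have h5' : ¬((List.count "J" chars : Int) = 5) := by
      simpa [PySem.List.count_eq] using h5
    rw [A_eq chars h5', B_eq chars h5']
    apply PySem.List.foldl_congr_mem
    intro b c hc
    have hcf : c ∈ fltJ chars := (PySem.Set.mem_ofList _ _).mp hc
    rcases (mem_fltJ chars c).mp hcf with ⟨hcC, hcJ⟩
    rw [core chars c hcC hcJ]
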